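-- pv_equiv track=rewrite | github.com/FakeNewss/OCRDetector | src/WpsCal.py | callOCF
-- ===== SOURCE A (Python) =====
-- def callOCF(up, down):
--     win = 10
--     loc = 60
--     length = len(up)
--     ocf = [0] * length
--     start = loc + win + 1
--     end = length - start
--     while start <= end:
--         tmpocf = 0
--         x = start - loc - win
--         y = start - loc + win
--         while x <= y:
--             tmpocf += down[x] - up[x]
--             x += 1
--         x = start + loc - win
--         y = start + loc + win
--         while x <= y:
--             tmpocf += up[x] - down[x]
--             x += 1
--         ocf[start] = tmpocf
--         start += 1
--     return ocf
-- ===== SOURCE B (Python) =====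
-- def callOCF(up, down):
--     win = 10
--     loc = 60
--     n = len(up)
--     ocf = [0] * n
--     lo = loc + win + 1
--     hi = n - lo
--     if lo > hi:
--         return ocf
--     # prefix sums: P[i] = sum of (down[j] - up[j]) for j < i
--     P = [0] * (n + 1)
--     for i in range(n):
--         P[i + 1] = P[i] + down[i] - up[i]
--     for s in range(lo, hi + 1):
--         ocf[s] = (P[s - loc + win + 1] - P[s - loc - win]) - (P[s + loc + win + 1] - P[s + loc - win])
--     return ocf
-- ===== Notes on version B (the rewrite author's own statement) =====
-- stated objective: faster
-- what changed: Replaces A's rescans of both 21-element windows at every position by a single prefix-sum pass over (down-up), so each window sum becomes an O(1) difference of two prefix values.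
import Mathlib
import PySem

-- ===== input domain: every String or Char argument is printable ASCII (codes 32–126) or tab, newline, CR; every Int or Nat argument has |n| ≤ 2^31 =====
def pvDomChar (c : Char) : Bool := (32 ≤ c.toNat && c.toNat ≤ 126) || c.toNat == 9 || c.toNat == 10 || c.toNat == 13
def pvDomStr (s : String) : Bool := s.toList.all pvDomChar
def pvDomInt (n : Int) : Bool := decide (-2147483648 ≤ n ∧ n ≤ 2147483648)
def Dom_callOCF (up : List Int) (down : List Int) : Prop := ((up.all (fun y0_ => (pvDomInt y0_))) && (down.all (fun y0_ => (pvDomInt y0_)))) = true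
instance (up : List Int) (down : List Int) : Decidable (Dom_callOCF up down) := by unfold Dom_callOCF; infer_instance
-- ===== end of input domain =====

-- B replaces A's per-position window rescans by one prefix-sum pass of (down-up), each window sum becoming an O(1) range difference.


-- ===== PORT A =====
-- inner `while x <= y: tmpocf += down[x] - up[x]`
def pvSumDU (up down : List Int) (x y : Int) : Int :=
  if _h : x ≤ y then
    (PySem.List.pyGetD down x 0 - PySem.List.pyGetD up x 0) + pvSumDU up down (x + 1) y
  else 0
termination_by (y + 1 - x).toNat
decreasing_by omega

-- inner `while x <= y: tmpocf += up[x] - down[x]`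
def pvSumUD (up down : List Int) (x y : Int) : Int :=
  if _h : x ≤ y then
    (PySem.List.pyGetD up x 0 - PySem.List.pyGetD down x 0) + pvSumUD up down (x + 1) y
  else 0
termination_by (y + 1 - x).toNat
decreasing_by omega

-- outer `while start <= end`
def pvLoopA (up down : List Int) (start stop : Int) (ocf : List Int) : List Int :=
  if h : start ≤ stop then
    let tmpocf := pvSumDU up down (start - 60 - 10) (start - 60 + 10)
                + pvSumUD up down (start + 60 - 10) (start + 60 + 10)
    pvLoopA up down (start + 1) stop (PySem.List.pySetD ocf start tmpocf)
  else ocf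
termination_by (stop + 1 - start).toNat
decreasing_by omega

def callOCF (up : List Int) (down : List Int) : List Int :=
  -- win = 10, loc = 60, start = loc + win + 1 = 71, end = length - start
  pvLoopA up down 71 ((up.length : Int) - 71) (List.replicate up.length 0)

-- ===== PORT B =====
-- Source B's prefix-sum pass: P = 0 :: pvScanB up down 0, so P[i+1] = P[i] + down[i] - up[i]
def pvScanB (up down : List Int) (acc : Int) : List Int :=
  match up, down with
  | u :: us, d :: ds => (acc + d - u) :: pvScanB us ds (acc + d - u)
  | _, _ => []

-- Source B's `for s in range(lo, hi+1)` filling ocf with O(1) range differences of P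
def pvLoopB (P : List Int) (s stop : Int) (ocf : List Int) : List Int :=
  if h : s ≤ stop then
    let v := (PySem.List.pyGetD P (s - 60 + 10 + 1) 0 - PySem.List.pyGetD P (s - 60 - 10) 0)
           - (PySem.List.pyGetD P (s + 60 + 10 + 1) 0 - PySem.List.pyGetD P (s + 60 - 10) 0)
    pvLoopB P (s + 1) stop (PySem.List.pySetD ocf s v)
  else ocf
termination_by (stop + 1 - s).toNat
decreasing_by omega

def callOCF_alt (up : List Int) (down : List Int) : List Int :=
  let n : Int := (up.length : Int)
  let ocf := List.replicate up.length 0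
  if 71 ≤ n - 71 then
    pvLoopB ((0 : Int) :: pvScanB up down 0) 71 (n - 71) ocf
  else ocf

-- ===== PRECONDITION & SPEC =====
-- Pre_ excludes only inputs where A raises IndexError: when the loop runs (len(up) ≥ 142)
-- it reads down[1..len(up)-1], so down must be at least as long as up.
def Pre_callOCF (up : List Int) (down : List Int) : Prop :=
  142 ≤ up.length → up.length ≤ down.length
instance (up : List Int) (down : List Int) : Decidable (Pre_callOCF up down) := by
  unfold Pre_callOCF; infer_instance

def pvWitness_callOCF : List Int × List Int := ([0, 1, 2], [1, 2, 3])

def Spec_callOCF (up : List Int) (down : List Int) (out : List Int) : Prop := out = callOCF_alt up down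
instance (up : List Int) (down : List Int) (out : List Int) : Decidable (Spec_callOCF up down out) := by unfold Spec_callOCF; infer_instance

-- ===== CLAIM (what is proved, stated in full; the proofs are below) =====
def Claim_equal_callOCF : Prop := ∀ (up : List Int) (down : List Int), Dom_callOCF up down → Pre_callOCF up down → Spec_callOCF up down (callOCF up down)

-- ===== LEMMAS AND PROOFS =====

-- mathematical prefix sum: pvPref i = Σ_{j<i} (down[j] - up[j]) (with pyGetD's default)
def pvPref (up down : List Int) : Nat → Int
  | 0 => 0
  | i + 1 => pvPref up down i + PySem.List.pyGetD down (i : Int) 0 - PySem.List.pyGetD up (i : Int) 0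

lemma pvPref_congr (up down : List Int) {i j : Nat} (h : i = j) :
    pvPref up down i = pvPref up down j := by rw [h]

lemma pvSumDU_eq (up down : List Int) :
    ∀ (k : Nat) (x y : Int), 0 ≤ x → x ≤ y + 1 → (y + 1 - x).toNat = k →
      pvSumDU up down x y = pvPref up down (y + 1).toNat - pvPref up down x.toNat := by
  intro k
  induction k with
  | zero =>
    intro x y hx hxy hk
    rw [pvSumDU, dif_neg (by omega)]
    rw [pvPref_congr up down (show (y+1).toNat = x.toNat by omega)]
    omega
  | succ k ih =>
    intro x y hx hxy hk
    rw [pvSumDU, dif_pos (by omega)]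
    rw [ih (x + 1) y (by omega) (by omega) (by omega)]
    have hx1 : (x + 1).toNat = x.toNat + 1 := by omega
    rw [hx1]
    have hxx : ((x.toNat : Nat) : Int) = x := by omega
    simp only [pvPref, hxx]
    ring

lemma pvSumUD_eq (up down : List Int) :
    ∀ (k : Nat) (x y : Int), 0 ≤ x → x ≤ y + 1 → (y + 1 - x).toNat = k →
      pvSumUD up down x y = pvPref up down x.toNat - pvPref up down (y + 1).toNat := by
  intro k
  induction k with
  | zero =>
    intro x y hx hxy hk
    rw [pvSumUD, dif_neg (by omega)]
    rw [pvPref_congr up down (show (y+1).toNat = x.toNat by omega)]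
    omega
  | succ k ih =>
    intro x y hx hxy hk
    rw [pvSumUD, dif_pos (by omega)]
    rw [ih (x + 1) y (by omega) (by omega) (by omega)]
    have hx1 : (x + 1).toNat = x.toNat + 1 := by omega
    rw [hx1]
    have hxx : ((x.toNat : Nat) : Int) = x := by omega
    simp only [pvPref, hxx]
    ring

lemma pvPref_cons (u d : Int) (us ds : List Int) :
    ∀ (j : Nat), pvPref (u :: us) (d :: ds) (j + 1) = (d - u) + pvPref us ds j := by
  intro j
  induction j with
  | zero =>
    simp [pvPref, PySem.List.pyGetD_zero_cons]
  | succ j ih =>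
    show pvPref (u :: us) (d :: ds) (j + 1) + _ - _ = _
    rw [ih]
    have h1 : PySem.List.pyGetD (d :: ds) ((j + 1 : Nat) : Int) 0 = PySem.List.pyGetD ds (j : Int) 0 := by
      rw [PySem.List.pyGetD_natCast, PySem.List.pyGetD_natCast, List.getD_cons_succ]
    have h2 : PySem.List.pyGetD (u :: us) ((j + 1 : Nat) : Int) 0 = PySem.List.pyGetD us (j : Int) 0 := by
      rw [PySem.List.pyGetD_natCast, PySem.List.pyGetD_natCast, List.getD_cons_succ]
    rw [h1, h2]
    simp only [pvPref]
    ring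

lemma pvScanB_getD (up : List Int) :
    ∀ (down : List Int) (acc : Int) (j : Nat), j ≤ up.length → up.length ≤ down.length →
      ((acc :: pvScanB up down acc).getD j 0) = acc + pvPref up down j := by
  induction up with
  | nil =>
    intro down acc j hj _
    have hj0 : j = 0 := by simpa using hj
    subst hj0
    simp [pvPref]
  | cons u us ih =>
    intro down acc j hj hlen
    match down with
    | [] => simp at hlen
    | d :: ds =>
      match j with
      | 0 => simp [pvPref]
      | j + 1 =>
        show ((acc + d - u) :: pvScanB us ds (acc + d - u)).getD j 0 = _
        rw [ih ds (acc + d - u) j (by simpa using hj) (by simpa using hlen)]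
        rw [pvPref_cons]
        ring

-- the two loop bodies compute the same value at every position the loop visits
lemma body_eq (up down : List Int) (hlen : up.length ≤ down.length) (s : Int)
    (hs : 71 ≤ s) (hs2 : s ≤ (up.length : Int) - 71) :
    pvSumDU up down (s - 60 - 10) (s - 60 + 10) + pvSumUD up down (s + 60 - 10) (s + 60 + 10)
    = (PySem.List.pyGetD ((0 : Int) :: pvScanB up down 0) (s - 60 + 10 + 1) 0
        - PySem.List.pyGetD ((0 : Int) :: pvScanB up down 0) (s - 60 - 10) 0)
      - (PySem.List.pyGetD ((0 : Int) :: pvScanB up down 0) (s + 60 + 10 + 1) 0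
        - PySem.List.pyGetD ((0 : Int) :: pvScanB up down 0) (s + 60 - 10) 0) := by
  have hP : ∀ (i : Int), 0 ≤ i → i ≤ (up.length : Int) →
      PySem.List.pyGetD ((0 : Int) :: pvScanB up down 0) i 0 = pvPref up down i.toNat := by
    intro i hi hin
    have hcast : i = ((i.toNat : Nat) : Int) := by omega
    conv_lhs => rw [hcast]
    rw [PySem.List.pyGetD_natCast, pvScanB_getD up down 0 i.toNat (by omega) hlen]
    ring
  rw [pvSumDU_eq up down ((s - 60 + 10) + 1 - (s - 60 - 10)).toNat (s - 60 - 10) (s - 60 + 10)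
      (by omega) (by omega) rfl]
  rw [pvSumUD_eq up down ((s + 60 + 10) + 1 - (s + 60 - 10)).toNat (s + 60 - 10) (s + 60 + 10)
      (by omega) (by omega) rfl]
  rw [hP (s - 60 + 10 + 1) (by omega) (by omega), hP (s - 60 - 10) (by omega) (by omega),
      hP (s + 60 + 10 + 1) (by omega) (by omega), hP (s + 60 - 10) (by omega) (by omega)]
  have e1 : ((s - 60 + 10) + 1).toNat = (s - 60 + 10 + 1).toNat := by omega
  have e2 : ((s + 60 + 10) + 1).toNat = (s + 60 + 10 + 1).toNat := by omega
  rw [pvPref_congr up down e1, pvPref_congr up down e2]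
  ring

lemma loop_eq (up down : List Int) (hlen : up.length ≤ down.length) :
    ∀ (k : Nat) (s : Int) (ocf : List Int), 71 ≤ s →
      (((up.length : Int) - 71) + 1 - s).toNat = k →
      pvLoopA up down s ((up.length : Int) - 71) ocf
        = pvLoopB ((0 : Int) :: pvScanB up down 0) s ((up.length : Int) - 71) ocf := by
  intro k
  induction k with
  | zero =>
    intro s ocf hs hk
    rw [pvLoopA, dif_neg (by omega), pvLoopB, dif_neg (by omega)]
  | succ k ih =>
    intro s ocf hs hk
    rw [pvLoopA, dif_pos (by omega), pvLoopB, dif_pos (by omega)]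
    rw [body_eq up down hlen s hs (by omega)]
    exact ih (s + 1) _ (by omega) (by omega)

-- ===== VERDICT (by name: the statement is the Claim_ definition above) =====
theorem callOCF_spec : Claim_equal_callOCF := by
  intro up down _ hpre
  unfold Spec_callOCF callOCF callOCF_alt
  by_cases hbig : (71 : Int) ≤ (up.length : Int) - 71
  · simp only [hbig, if_pos]
    exact loop_eq up down (hpre (by omega)) _ 71 _ (by omega) rfl
  · simp only [hbig, if_false]
    rw [pvLoopA, dif_neg (by omega)]
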